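-- pv_equiv track=rewrite | github.com/d-villamil/network-health-tracker | cet_tracker.py | _extract_exception_reasons
-- ===== SOURCE A (Python) =====
-- REASON_LABELS = {
--     "SHIPMENT_EXCEPTION_REASON_CODE_NONE": "",
--     "SHIPMENT_EXCEPTION_REASON_CODE_HELD_AT_SHIPPER": "Held at Shipper",
--     "SHIPMENT_EXCEPTION_REASON_CODE_MERCHANT_NOT_READY": "Merchant Not Ready",
--     "SHIPMENT_EXCEPTION_REASON_CODE_DASHLINK_TENDER_ERROR": "Tender Error",
--     "SHIPMENT_EXCEPTION_REASON_CODE_TRAFFIC": "Traffic",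
--     "SHIPMENT_EXCEPTION_REASON_CODE_MECHANICAL_FAILURE": "Mechanical Failure",
--     "SHIPMENT_EXCEPTION_REASON_CODE_DRIVER_ERROR_HOS": "Driver HOS",
--     "SHIPMENT_EXCEPTION_REASON_CODE_CARRIER_DISPATCH_ERROR": "Carrier Dispatch Error",
--     "SHIPMENT_EXCEPTION_REASON_CODE_TMS_EDI_DATA_ERROR": "TMS/EDI Data Error",
-- }
--
-- def _extract_exception_reasons(stop_exceptions: list[dict]) -> str:
--     if not stop_exceptions:
--         return ""
--     # Group by reason, collect which timestamp types apply
--     reason_types: dict[str, set[str]] = {}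
--     for exc in stop_exceptions:
--         code = exc.get("reason_code", "")
--         label = REASON_LABELS.get(code, code.replace("SHIPMENT_EXCEPTION_REASON_CODE_", "").replace("_", " ").title())
--         if not label:
--             continue
--         ts_type = exc.get("timestamp_type", "").replace("STOP_EXCEPTION_TIMESTAMP_TYPE_", "").lower()
--         reason_types.setdefault(label, set()).add(ts_type)
--
--     parts = []
--     for reason, types in sorted(reason_types.items()):
--         type_str = ", ".join(sorted(types))
--         parts.append(f"{reason} ({type_str})")
--     return "; ".join(parts) if parts else ""
-- ===== SOURCE B (Python) =====
-- REASON_LABELS = {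
--     "SHIPMENT_EXCEPTION_REASON_CODE_NONE": "",
--     "SHIPMENT_EXCEPTION_REASON_CODE_HELD_AT_SHIPPER": "Held at Shipper",
--     "SHIPMENT_EXCEPTION_REASON_CODE_MERCHANT_NOT_READY": "Merchant Not Ready",
--     "SHIPMENT_EXCEPTION_REASON_CODE_DASHLINK_TENDER_ERROR": "Tender Error",
--     "SHIPMENT_EXCEPTION_REASON_CODE_TRAFFIC": "Traffic",
--     "SHIPMENT_EXCEPTION_REASON_CODE_MECHANICAL_FAILURE": "Mechanical Failure",
--     "SHIPMENT_EXCEPTION_REASON_CODE_DRIVER_ERROR_HOS": "Driver HOS",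
--     "SHIPMENT_EXCEPTION_REASON_CODE_CARRIER_DISPATCH_ERROR": "Carrier Dispatch Error",
--     "SHIPMENT_EXCEPTION_REASON_CODE_TMS_EDI_DATA_ERROR": "TMS/EDI Data Error",
-- }
--
--
-- def _label(exc):
--     code = exc.get("reason_code", "")
--     return REASON_LABELS.get(code, code.replace("SHIPMENT_EXCEPTION_REASON_CODE_", "").replace("_", " ").title())
--
--
-- def _ts(exc):
--     return exc.get("timestamp_type", "").replace("STOP_EXCEPTION_TIMESTAMP_TYPE_", "").lower()
--
--
-- def _extract_exception_reasons(stop_exceptions: list) -> str: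
--     labels = sorted({_label(e) for e in stop_exceptions} - {""})
--     return "; ".join(
--         "{} ({})".format(
--             lab,
--             ", ".join(sorted({_ts(e) for e in stop_exceptions if _label(e) == lab})),
--         )
--         for lab in labels
--     )
-- ===== Notes on version B (the rewrite author's own statement) =====
-- stated objective: simpler
-- what changed: B drops A's one-pass mutable dict-of-sets grouping entirely: it computes the sorted set of nonempty labels once, then builds each group's sorted timestamp-type set by filtering the input per label, joining directly.
import Mathlib
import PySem

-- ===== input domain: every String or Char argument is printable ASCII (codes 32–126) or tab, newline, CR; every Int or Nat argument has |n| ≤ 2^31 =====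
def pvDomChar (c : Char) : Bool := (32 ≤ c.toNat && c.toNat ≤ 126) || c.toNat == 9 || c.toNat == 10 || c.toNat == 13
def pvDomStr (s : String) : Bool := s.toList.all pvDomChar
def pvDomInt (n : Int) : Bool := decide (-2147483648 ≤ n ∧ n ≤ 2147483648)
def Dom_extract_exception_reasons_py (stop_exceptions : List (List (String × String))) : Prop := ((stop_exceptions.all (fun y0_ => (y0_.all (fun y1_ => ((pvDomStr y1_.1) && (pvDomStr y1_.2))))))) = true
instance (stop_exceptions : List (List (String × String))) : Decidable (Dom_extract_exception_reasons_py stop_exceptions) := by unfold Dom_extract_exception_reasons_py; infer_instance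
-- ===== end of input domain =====

-- B replaces A's one-pass dict-of-sets grouping by a direct two-pass formulation (sorted label set,
-- then a per-label filter for its timestamp types): simpler, no intermediate mutable dict.

-- ===== PORT A =====
-- shared helpers: both Pythons compute the label and the timestamp type by the identical expressions

-- str.title() on the ASCII domain: uppercase an alphabetic char after a non-alphabetic one, lowercase the rest
def pvTitleGo : List Char → Bool → List Char
  | [], _ => []
  | c :: cs, prev =>
    (if PySem.Chars.isalpha c then
        (if prev then PySem.Chars.lowerChar c else PySem.Chars.upperChar c)
      else c) :: pvTitleGo cs (PySem.Chars.isalpha c)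

def pvTitle (s : String) : String := String.ofList (pvTitleGo s.toList false)

def pvReasonLabels : PySem.Dict String String := PySem.Dict.ofList
  [ ("SHIPMENT_EXCEPTION_REASON_CODE_NONE", "")
  , ("SHIPMENT_EXCEPTION_REASON_CODE_HELD_AT_SHIPPER", "Held at Shipper")
  , ("SHIPMENT_EXCEPTION_REASON_CODE_MERCHANT_NOT_READY", "Merchant Not Ready")
  , ("SHIPMENT_EXCEPTION_REASON_CODE_DASHLINK_TENDER_ERROR", "Tender Error")
  , ("SHIPMENT_EXCEPTION_REASON_CODE_TRAFFIC", "Traffic")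
  , ("SHIPMENT_EXCEPTION_REASON_CODE_MECHANICAL_FAILURE", "Mechanical Failure")
  , ("SHIPMENT_EXCEPTION_REASON_CODE_DRIVER_ERROR_HOS", "Driver HOS")
  , ("SHIPMENT_EXCEPTION_REASON_CODE_CARRIER_DISPATCH_ERROR", "Carrier Dispatch Error")
  , ("SHIPMENT_EXCEPTION_REASON_CODE_TMS_EDI_DATA_ERROR", "TMS/EDI Data Error") ]

-- label = REASON_LABELS.get(code, code.replace(...).replace("_", " ").title())
def pvLabelOf (exc : List (String × String)) : String :=
  let code := PySem.Dict.getD ⟨exc⟩ "reason_code" ""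
  (PySem.Dict.get? pvReasonLabels code).getD
    (pvTitle (PySem.Str.replace (PySem.Str.replace code "SHIPMENT_EXCEPTION_REASON_CODE_" "") "_" " "))

-- ts_type = exc.get("timestamp_type", "").replace("STOP_EXCEPTION_TIMESTAMP_TYPE_", "").lower()
def pvTsOf (exc : List (String × String)) : String :=
  PySem.Str.lower (PySem.Str.replace (PySem.Dict.getD ⟨exc⟩ "timestamp_type" "") "STOP_EXCEPTION_TIMESTAMP_TYPE_" "")

def extract_exception_reasons_py (stop_exceptions : List (List (String × String))) : String :=
  if stop_exceptions = [] then "" else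
  -- reason_types.setdefault(label, set()).add(ts_type) = modify with default ∅
  let reason_types : PySem.Dict String (PySem.Set String) :=
    stop_exceptions.foldl (fun d exc =>
      let label := pvLabelOf exc
      if label = "" then d
      else PySem.Dict.modify d label PySem.Set.empty (fun s => PySem.Set.add s (pvTsOf exc)))
      PySem.Dict.empty
  -- Python sorts reason_types.items(); the keys are distinct, so sorting by the key alone is that order
  let parts : List String :=
    (PySem.List.sorted reason_types.items (fun p => p.1)).map
      (fun p => p.1 ++ " (" ++ PySem.Str.join ", " (PySem.List.sorted p.2 (fun t => t)) ++ ")")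
  if parts = [] then "" else PySem.Str.join "; " parts

-- ===== PORT B =====
def extract_exception_reasons_py_alt (stop_exceptions : List (List (String × String))) : String :=
  let labels := PySem.List.sorted
    (PySem.Set.diff (PySem.Set.ofList (stop_exceptions.map pvLabelOf)) (PySem.Set.ofList [""]))
    (fun x => x)
  PySem.Str.join "; " (labels.map (fun lab =>
    lab ++ " (" ++
      PySem.Str.join ", "
        (PySem.List.sorted
          (PySem.Set.ofList ((stop_exceptions.filter (fun e => pvLabelOf e == lab)).map pvTsOf))
          (fun t => t)) ++ ")"))

-- ===== PRECONDITION & SPEC =====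
def Spec_extract_exception_reasons_py (stop_exceptions : List (List (String × String))) (out : String) : Prop := out = extract_exception_reasons_py_alt stop_exceptions
instance (stop_exceptions : List (List (String × String))) (out : String) : Decidable (Spec_extract_exception_reasons_py stop_exceptions out) := by unfold Spec_extract_exception_reasons_py; infer_instance

-- ===== CLAIM (what is proved, stated in full; the proofs are below) =====
def Claim_equal_extract_exception_reasons_py : Prop := ∀ (stop_exceptions : List (List (String × String))), Dom_extract_exception_reasons_py stop_exceptions → Spec_extract_exception_reasons_py stop_exceptions (extract_exception_reasons_py stop_exceptions)

-- ===== LEMMAS AND PROOFS =====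

-- the (label, ts_type) pairs of the exceptions with a nonempty label, in order
def pvPairs (sx : List (List (String × String))) : List (String × String) :=
  (sx.filter (fun e => !(pvLabelOf e == ""))).map (fun e => (pvLabelOf e, pvTsOf e))

-- A's dict loop only acts on the exceptions with a nonempty label
theorem pvFold_eq_pairs (sx : List (List (String × String)))
    (d : PySem.Dict String (PySem.Set String)) :
    sx.foldl (fun d exc =>
      let label := pvLabelOf exc
      if label = "" then d
      else PySem.Dict.modify d label PySem.Set.empty (fun s => PySem.Set.add s (pvTsOf exc))) d
    = (pvPairs sx).foldl
        (fun d p => PySem.Dict.modify d p.1 PySem.Set.empty (fun s => PySem.Set.add s p.2)) d := by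
  induction sx generalizing d with
  | nil => rfl
  | cons e sx ih =>
    by_cases h : pvLabelOf e = ""
    · simp only [pvPairs, List.foldl_cons, List.filter_cons, h]
      simpa [pvPairs, h] using ih d
    · simp only [pvPairs, List.foldl_cons, List.filter_cons, h]
      simpa [pvPairs, h] using
        ih (PySem.Dict.modify d (pvLabelOf e) PySem.Set.empty (fun s => PySem.Set.add s (pvTsOf e)))

-- value of the grouping fold at any key
theorem pvGetD_fold (l : List (String × String)) (d : PySem.Dict String (PySem.Set String))
    (c : String) :
    ((l.foldl (fun d p => PySem.Dict.modify d p.1 PySem.Set.empty (fun s => PySem.Set.add s p.2)) d).getD c PySem.Set.empty)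
    = ((l.filter (fun p => p.1 == c)).map (·.2)).foldl PySem.Set.add (PySem.Dict.getD d c PySem.Set.empty) := by
  induction l generalizing d with
  | nil => rfl
  | cons p l ih =>
    by_cases h : p.1 = c
    · simp only [List.foldl_cons, List.filter_cons, h]
      rw [ih]
      simp
    · simp only [List.foldl_cons, List.filter_cons]
      rw [ih]
      simp [PySem.Dict.getD_modify, Ne.symm h, h]

-- the second filter of pvPairs at a nonempty key collapses
theorem pvPairs_filter (sx : List (List (String × String))) (k : String) (hk : k ≠ "") :
    (((pvPairs sx).filter (fun p => p.1 == k)).map (·.2))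
      = (sx.filter (fun e => pvLabelOf e == k)).map pvTsOf := by
  unfold pvPairs
  rw [List.filter_map, List.filter_filter, List.map_map]
  congr 1
  apply List.filter_congr
  intro e _
  by_cases hbe : pvLabelOf e = k
  · simp [hbe, hk]
  · simp [hbe]

theorem pv_main (sx : List (List (String × String))) :
    extract_exception_reasons_py sx = extract_exception_reasons_py_alt sx := by
  by_cases hnil : sx = []
  · subst hnil; rfl
  · simp only [extract_exception_reasons_py, extract_exception_reasons_py_alt, if_neg hnil]
    rw [pvFold_eq_pairs]
    set rt := (pvPairs sx).foldl
      (fun d p => PySem.Dict.modify d p.1 PySem.Set.empty (fun s => PySem.Set.add s p.2))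
      PySem.Dict.empty with hrt
    have hkeys : rt.keys = PySem.Set.ofList ((pvPairs sx).map Prod.fst) := by
      have h1 := PySem.Dict.keys_foldl_modify_key (κ := String) (ν := PySem.Set String)
        (pvPairs sx) (fun p => p.1) PySem.Set.empty (fun _ p s => PySem.Set.add s p.2)
        PySem.Dict.empty
      simpa [PySem.Dict.keys_empty, PySem.Set.update_nil_left] using h1
    have hnodup : rt.keys.Nodup := by
      have h1 := PySem.Dict.nodup_keys_foldl_modify_key (κ := String) (ν := PySem.Set String)
        (pvPairs sx) (fun p => p.1) PySem.Set.empty (fun _ p s => PySem.Set.add s p.2)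
        PySem.Dict.empty (by simp [PySem.Dict.keys_empty])
      simpa using h1
    have hget : ∀ c, rt.getD c PySem.Set.empty
        = PySem.Set.ofList (((pvPairs sx).filter (fun p => p.1 == c)).map (·.2)) := by
      intro c
      rw [hrt, pvGetD_fold]
      simp [PySem.Set.ofList_eq_foldl, PySem.Set.empty]
    have hsorted : PySem.List.sorted rt.items (fun p => p.1)
        = (PySem.List.sorted (PySem.Set.ofList ((pvPairs sx).map Prod.fst)) (fun x => x)).map
            (fun k => (k, rt.getD k PySem.Set.empty)) := by
      apply PySem.List.sorted_eq_of_perm_of_pairwise_lt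
      · rw [PySem.Dict.items_eq_map_keys rt hnodup PySem.Set.empty, hkeys]
        exact (PySem.List.sorted_perm _ _ _).map _
      · rw [List.pairwise_map]
        simpa using PySem.List.sorted_ofList_pairwise_lt ((pvPairs sx).map Prod.fst)
    have hlabels : PySem.List.sorted
        (PySem.Set.diff (PySem.Set.ofList (sx.map pvLabelOf)) (PySem.Set.ofList [""]))
        (fun x => x)
        = PySem.List.sorted (PySem.Set.ofList ((pvPairs sx).map Prod.fst)) (fun x => x) := by
      apply PySem.List.sorted_eq_sorted_of_perm _ _ _ (fun a b h => h)
      rw [List.perm_ext_iff_of_nodup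
        (PySem.Set.nodup_diff _ _ (PySem.Set.nodup_ofList _)) (PySem.Set.nodup_ofList _)]
      intro a
      simp only [PySem.Set.mem_diff, PySem.Set.mem_ofList, pvPairs, List.mem_map,
        List.mem_filter, List.mem_singleton]
      constructor
      · rintro ⟨⟨e, he, rfl⟩, hne⟩
        exact ⟨(pvLabelOf e, pvTsOf e), ⟨e, ⟨he, by simpa using hne⟩, rfl⟩, rfl⟩
      · rintro ⟨p, ⟨e, ⟨he, hne⟩, rfl⟩, rfl⟩
        exact ⟨⟨e, he, rfl⟩, by simpa using hne⟩
    have hkne : ∀ k ∈ PySem.List.sorted (PySem.Set.ofList ((pvPairs sx).map Prod.fst))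
        (fun x => x), k ≠ "" := by
      intro k hk
      have hk' : k ∈ (pvPairs sx).map Prod.fst := by
        have := (PySem.List.sorted_perm (PySem.Set.ofList ((pvPairs sx).map Prod.fst))
          (fun x => x) false).mem_iff.mp hk
        simpa [PySem.Set.mem_ofList] using this
      simp only [pvPairs, List.mem_map, List.mem_filter] at hk'
      obtain ⟨p, ⟨e, ⟨_, hne⟩, rfl⟩, rfl⟩ := hk'
      simpa using hne
    have hparts : (PySem.List.sorted rt.items (fun p => p.1)).map
          (fun p => p.1 ++ " (" ++ PySem.Str.join ", " (PySem.List.sorted p.2 (fun t => t)) ++ ")")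
        = (PySem.List.sorted (PySem.Set.ofList ((pvPairs sx).map Prod.fst)) (fun x => x)).map
            (fun lab => lab ++ " (" ++
              PySem.Str.join ", "
                (PySem.List.sorted
                  (PySem.Set.ofList ((sx.filter (fun e => pvLabelOf e == lab)).map pvTsOf))
                  (fun t => t)) ++ ")") := by
      rw [hsorted, List.map_map]
      apply List.map_congr_left
      intro k hk
      simp only [Function.comp]
      rw [hget k, pvPairs_filter sx k (hkne k hk)]
    rw [hlabels, ← hparts]
    split_ifs with h
    · rw [h]; rfl
    · rfl

-- ===== VERDICT (by name: the statement is the Claim_ definition above) =====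
theorem extract_exception_reasons_py_spec : Claim_equal_extract_exception_reasons_py := by
  intro sx _
  exact pv_main sx
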